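-- pv_equiv track=rewrite | github.com/gadulowaty/satel_integra_api | satel_integra_api/users.py | _ack_outputs_read
-- ===== SOURCE A (Python) =====
-- def _ack_outputs_read( value: int ) -> list[ int ]:
--     result = [ 0, 0, 0 ]
--     index_result = 0
--     for index in range( 0, 8 ):
--         if value & (1 << index) != 0:
--             result[ index_result ] = (index + 1)
--             index_result += 1
--             if index_result >= len( result ):
--                 break
--     return result
-- ===== SOURCE B (Python) =====
-- def _ack_outputs_read(value: int) -> list[int]:
--     v = value & 0xFF
--     out = []
--     for _ in range(3):
--         lsb = v & -v
--         out.append(lsb.bit_length())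
--         v &= v - 1
--     return out
-- ===== Notes on version B (the rewrite author's own statement) =====
-- stated objective: alternative
-- what changed: Replaces A's indexed scan of bits 0..7 with a fixed result buffer, write cursor and break by a lowest-set-bit extraction loop: mask to one byte, then exactly three times isolate the lowest set bit arithmetically (v & -v), record its position as bit_length, and clear it (v &= v - 1); zero-padding falls out because the lsb of 0 is 0.
import Mathlib
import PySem

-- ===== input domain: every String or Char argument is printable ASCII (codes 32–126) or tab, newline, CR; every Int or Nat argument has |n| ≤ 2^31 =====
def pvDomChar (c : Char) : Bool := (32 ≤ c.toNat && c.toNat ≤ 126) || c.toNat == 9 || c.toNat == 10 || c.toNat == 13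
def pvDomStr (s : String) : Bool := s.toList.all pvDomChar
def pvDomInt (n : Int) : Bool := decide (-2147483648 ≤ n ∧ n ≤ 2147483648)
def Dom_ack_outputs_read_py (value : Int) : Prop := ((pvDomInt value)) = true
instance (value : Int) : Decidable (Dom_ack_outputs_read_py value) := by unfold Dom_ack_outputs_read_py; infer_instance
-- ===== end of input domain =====

-- B: instead of scanning indices 0..7 with a write cursor and break, mask to 8 bits and three
-- times isolate the lowest set bit arithmetically (v & -v), record its position as bit_length,
-- and clear it (v &= v-1); padding with 0 falls out since the lsb of 0 is 0. Objective: alternative.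

-- ===== PORT A =====
-- A's for-loop with break, as structural recursion over the index list with state (result, index_result).
-- i ∈ range(0,8) is nonnegative and index_result ∈ [0,2] whenever written, so i.toNat / ir.toNat are exact here.
def ackA_go (value : Int) : List Int → List Int → Int → List Int
  | [], result, _ => result
  | i :: rest, result, ir =>
    if PySem.Int.band value ((1 : Int) <<< i.toNat) ≠ 0 then
      let result' := result.set ir.toNat (i + 1)
      let ir' := ir + 1
      if ir' ≥ (result'.length : Int) then result'
      else ackA_go value rest result' ir'
    else ackA_go value rest result ir

def ack_outputs_read_py (value : Int) : List Int :=
  ackA_go value (PySem.List.pyRange 0 8 1) [0, 0, 0] 0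

-- ===== PORT B =====
-- one iteration of B's loop body: append bit_length(v & -v), then v &= v - 1
def ackB_step (st : List Int × Int) (_ : Int) : List Int × Int :=
  let lsb := PySem.Int.band st.2 (-st.2)
  (st.1 ++ [((PySem.Int.bitLength lsb : Nat) : Int)], PySem.Int.band st.2 (st.2 - 1))

def ack_outputs_read_py_alt (value : Int) : List Int :=
  ((PySem.List.pyRange 0 3 1).foldl ackB_step ([], PySem.Int.band value 255)).1

-- ===== PRECONDITION & SPEC =====
def Spec_ack_outputs_read_py (value : Int) (out : List Int) : Prop := out = ack_outputs_read_py_alt value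
instance (value : Int) (out : List Int) : Decidable (Spec_ack_outputs_read_py value out) := by unfold Spec_ack_outputs_read_py; infer_instance

-- ===== CLAIM (what is proved, stated in full; the proofs are below) =====
def Claim_equal_ack_outputs_read_py : Prop := ∀ (value : Int), Dom_ack_outputs_read_py value → Spec_ack_outputs_read_py value (ack_outputs_read_py value)

-- ===== LEMMAS AND PROOFS =====

-- band of a nonnegative value with 2^k tests bit k
theorem band_shift_nat (a k : Nat) :
    (PySem.Int.band (a : Int) ((1 : Int) <<< k) ≠ 0) ↔ a.testBit k := by
  have h1 : ((1 : Int) <<< k) = (((1 <<< k : Nat) : Nat) : Int) := by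
    simp [Int.shiftLeft_eq, Nat.shiftLeft_eq]
  rw [h1, PySem.Int.band_natCast]
  rw [Nat.shiftLeft_eq, one_mul, Nat.and_two_pow]
  rcases h : a.testBit k with _ | _ <;>
    simp

-- band of a negative value with 2^k tests the complement bit of m = -value - 1
theorem band_shift_neg (value : Int) (hv : value < 0) (k : Nat) :
    (PySem.Int.band value ((1 : Int) <<< k) ≠ 0) ↔ ¬ ((-value - 1).toNat.testBit k) := by
  have hb : (0 : Int) ≤ (1 : Int) <<< k := by
    rw [Int.shiftLeft_eq]; positivity
  have hbt : ((1 : Int) <<< k).toNat = 2 ^ k := by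
    rw [Int.shiftLeft_eq, one_mul]
    rw [show ((2 : Int) ^ k) = ((2 ^ k : Nat) : Int) by push_cast; ring]
    exact Int.toNat_natCast _
  unfold PySem.Int.band
  rw [if_neg (by omega), if_pos hb, hbt]
  rw [Nat.two_pow_and]
  rcases h : (-value - 1).toNat.testBit k with _ | _ <;>
    simp

-- the masked byte n = (value & 255) is nonnegative, < 256, and its bits below 8 are value's bits
theorem band255_nonneg (value : Int) : 0 ≤ PySem.Int.band value 255 := by
  rw [PySem.Int.band_comm]
  exact PySem.Int.band_nonneg_of_nonneg_left value (by norm_num)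

theorem band255_lt (value : Int) : (PySem.Int.band value 255).toNat < 256 := by
  by_cases hv : 0 ≤ value
  · unfold PySem.Int.band
    rw [if_pos hv, if_pos (by norm_num : (0:Int) ≤ 255)]
    rw [show (255:Int).toNat = 255 from rfl, Int.toNat_natCast]
    exact lt_of_le_of_lt Nat.and_le_right (by norm_num)
  · unfold PySem.Int.band
    rw [if_neg hv, if_pos (by norm_num : (0:Int) ≤ 255)]
    rw [show (255:Int).toNat = 255 from rfl, Int.toNat_natCast]
    have := Nat.sub_le 255 (255 &&& (-value - 1).toNat)
    omega

theorem sub_is_xor (x : Nat) (hx : x < 256) : 255 - x = 255 ^^^ x := by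
  interval_cases x <;> rfl

theorem band255_testBit (value : Int) (k : Nat) (hk : k < 8) :
    ((PySem.Int.band value 255).toNat.testBit k = true)
      ↔ (PySem.Int.band value ((1 : Int) <<< k) ≠ 0) := by
  by_cases hv : 0 ≤ value
  · obtain ⟨v, rfl⟩ : ∃ v : Nat, value = (v : Int) := ⟨value.toNat, by omega⟩
    rw [show (255 : Int) = ((255 : Nat) : Int) from rfl, PySem.Int.band_natCast,
      Int.toNat_natCast]
    rw [show (255 : Nat) = 2 ^ 8 - 1 by norm_num, Nat.and_two_pow_sub_one_eq_mod,
      Nat.testBit_mod_two_pow]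
    rw [band_shift_nat]
    simp [hk]
  · replace hv : value < 0 := by omega
    have hm : PySem.Int.band value 255
        = ((255 - (255 &&& (-value - 1).toNat) : Nat) : Int) := by
      unfold PySem.Int.band
      rw [if_neg (by omega), if_pos (by norm_num)]
      rfl
    have hand : (255 : Nat) &&& (-value - 1).toNat = (-value - 1).toNat % 2 ^ 8 := by
      rw [Nat.and_comm, show (255 : Nat) = 2 ^ 8 - 1 by norm_num,
        Nat.and_two_pow_sub_one_eq_mod]
    have h255 : (255 : Nat).testBit k = true := by
      rw [show (255 : Nat) = 2 ^ 8 - 1 by norm_num, Nat.testBit_two_pow_sub_one]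
      simp [hk]
    have hb256 : (-value - 1).toNat % 2 ^ 8 < 256 :=
      Nat.mod_lt _ (by norm_num)
    rw [hm, Int.toNat_natCast, hand,
      sub_is_xor _ hb256, Nat.testBit_xor,
      Nat.testBit_mod_two_pow, h255, band_shift_neg value hv k]
    simp [hk]

-- A's loop only looks at value through the bit tests, so it is invariant under replacing
-- value by anything with the same tested bits
theorem ackA_go_congr (v w : Int) (l : List Int)
    (h : ∀ i ∈ l, (PySem.Int.band v ((1 : Int) <<< i.toNat) ≠ 0) ↔
        (PySem.Int.band w ((1 : Int) <<< i.toNat) ≠ 0)) :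
    ∀ res ir, ackA_go v l res ir = ackA_go w l res ir := by
  induction l with
  | nil => intro res ir; rfl
  | cons i rest ih =>
      intro res ir
      have hi := h i (by simp)
      have hrest : ∀ j ∈ rest, (PySem.Int.band v ((1 : Int) <<< j.toNat) ≠ 0) ↔
          (PySem.Int.band w ((1 : Int) <<< j.toNat) ≠ 0) := fun j hj => h j (by simp [hj])
      by_cases hc : PySem.Int.band v ((1 : Int) <<< i.toNat) ≠ 0
      · rw [ackA_go, ackA_go, if_pos hc, if_pos (hi.mp hc)]
        dsimp only
        split_ifs with h3
        · rfl
        · exact ih hrest _ _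
      · rw [ackA_go, ackA_go, if_neg hc, if_neg (fun hw => hc (hi.mpr hw))]
        exact ih hrest _ _

-- the 256-case core: the two ports agree on every byte
set_option maxRecDepth 100000 in
theorem core : ∀ n : Nat, n < 256 →
    ack_outputs_read_py (n : Int) = ack_outputs_read_py_alt (n : Int) := by decide

-- ===== VERDICT (by name: the statement is the Claim_ definition above) =====
theorem ack_outputs_read_py_spec : Claim_equal_ack_outputs_read_py := by
  intro value _
  unfold Spec_ack_outputs_read_py
  set n : Nat := (PySem.Int.band value 255).toNat with hn
  have hcast : PySem.Int.band value 255 = (n : Int) := by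
    rw [hn, Int.toNat_of_nonneg (band255_nonneg value)]
  have hlt : n < 256 := band255_lt value
  have hbit : ∀ k : Nat, k < 8 →
      ((PySem.Int.band value ((1 : Int) <<< k) ≠ 0) ↔
        (PySem.Int.band (n : Int) ((1 : Int) <<< k) ≠ 0)) := by
    intro k hk
    rw [band_shift_nat n k, hn]
    exact (band255_testBit value k hk).symm
  have hA : ack_outputs_read_py value = ack_outputs_read_py (n : Int) := by
    unfold ack_outputs_read_py
    apply ackA_go_congr
    intro i hi
    have hi8 := (PySem.List.mem_pyRange_one).mp hi
    exact hbit i.toNat (by omega)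
  have hidem : PySem.Int.band (n : Int) 255 = (n : Int) := by
    rw [show (255 : Int) = ((255 : Nat) : Int) from rfl, PySem.Int.band_natCast]
    rw [show (255 : Nat) = 2 ^ 8 - 1 by norm_num, Nat.and_two_pow_sub_one_eq_mod]
    rw [Nat.mod_eq_of_lt (by simpa using hlt)]
  have hB : ack_outputs_read_py_alt value = ack_outputs_read_py_alt (n : Int) := by
    unfold ack_outputs_read_py_alt
    rw [hcast, hidem]
  rw [hA, hB]
  exact core n hlt
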